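-- pv_equiv track=rewrite | github.com/JUNZHANG-Li/TruthTableGenerator-WithExercises | truthTable/truth_table_generator.py | BracketsPairing
-- ===== SOURCE A (Python) =====
-- def BracketsPairing(str, pos):
--     pair = 1
--     while pair != 0:
--         pos = pos + 1
--         if str[pos] == '(':
--             pair = pair + 1
--         elif str[pos] == ')':
--             pair = pair - 1
--     return pos
-- ===== SOURCE B (Python) =====
-- def BracketsPairing(str, pos):
--     pos = pos + 1
--     while str[pos] != ')':
--         if str[pos] == '(':
--             pos = BracketsPairing(str, pos) + 1
--         else:
--             pos = pos + 1
--     return pos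
-- ===== Notes on version B (the rewrite author's own statement) =====
-- stated objective: alternative
-- what changed: B replaces A's integer nesting counter (pair) with recursion: it scans for the current level's ')' and, on each inner '(', calls itself to jump directly past that inner pair, using the call stack instead of a counter.
import Mathlib
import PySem

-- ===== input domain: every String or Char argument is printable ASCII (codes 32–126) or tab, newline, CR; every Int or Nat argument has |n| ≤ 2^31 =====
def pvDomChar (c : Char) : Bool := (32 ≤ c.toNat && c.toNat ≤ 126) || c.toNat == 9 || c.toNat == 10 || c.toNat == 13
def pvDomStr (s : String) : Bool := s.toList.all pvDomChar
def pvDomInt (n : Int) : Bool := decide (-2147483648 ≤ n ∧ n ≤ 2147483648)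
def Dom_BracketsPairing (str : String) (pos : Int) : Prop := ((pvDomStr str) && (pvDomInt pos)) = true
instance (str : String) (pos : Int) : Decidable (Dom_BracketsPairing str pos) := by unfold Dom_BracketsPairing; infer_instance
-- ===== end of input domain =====

-- B replaces A's integer nesting counter by recursion: on an inner '(' it calls itself to
-- jump to that pair's close and continues after it (objective: alternative decomposition).

-- ===== PORT A =====
-- fuel bound: under Pre_ the scan stops inside the visited-character stream, whose length
-- is at most twice the string length, so this fuel is never exhausted on admitted inputs
def pvFuel (str : String) : Nat := 2 * str.toList.length + 1

-- the while loop of A: reads str[pos+1], updates the counter `pair`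
def pvLoopA (str : String) : Nat → Int → Int → Int
  | 0, pos, _ => pos
  | fuel + 1, pos, pair =>
    if pair = 0 then pos
    else
      match PySem.Str.pyGet? str (pos + 1) with
      | none => pos + 1   -- Python raises IndexError here; outside Pre_
      | some c =>
          pvLoopA str fuel (pos + 1) (if c = '(' then pair + 1 else if c = ')' then pair - 1 else pair)

def BracketsPairing (str : String) (pos : Int) : Int := pvLoopA str (pvFuel str) pos 1

-- ===== PORT B =====
-- the while loop of Source B, scanning at `pos`; the recursive call BracketsPairing(str, pos)
-- of Source B is pvFindB at pos+1
def pvFindB (str : String) : Nat → Int → Int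
  | 0, pos => pos
  | fuel + 1, pos =>
    match PySem.Str.pyGet? str pos with
    | none => pos   -- Python raises IndexError here; outside Pre_
    | some c =>
      if c = ')' then pos
      else if c = '(' then pvFindB str fuel (pvFindB str fuel (pos + 1) + 1)
      else pvFindB str fuel (pos + 1)

def BracketsPairing_alt (str : String) (pos : Int) : Int := pvFindB str (pvFuel str) (pos + 1)

-- ===== PRECONDITION & SPEC =====
-- the stream of characters Python's scan visits starting at int index s (for s ≥ -len:
-- a negative start reads the suffix via negative indices, then wraps to the whole string)
def pvStream (str : String) (s : Int) : List Char :=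
  if s < 0 then str.toList.drop (str.toList.length - (-s).toNat) ++ str.toList
  else str.toList.drop s.toNat

-- Pre_: exactly the inputs where A's scan terminates (no IndexError): the first read is in
-- range and some prefix of the visited stream contains one more ')' than '('
def Pre_BracketsPairing (str : String) (pos : Int) : Prop :=
  -(str.toList.length : Int) ≤ pos + 1 ∧
  ∃ j < (pvStream str (pos + 1)).length,
    (((pvStream str (pos + 1)).take (j + 1)).count ')' : Int) =
      (((pvStream str (pos + 1)).take (j + 1)).count '(' : Int) + 1
instance (str : String) (pos : Int) : Decidable (Pre_BracketsPairing str pos) := by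
  unfold Pre_BracketsPairing; infer_instance

def pvWitness_BracketsPairing : String × Int := ("()", 0)

def Spec_BracketsPairing (str : String) (pos : Int) (out : Int) : Prop := out = BracketsPairing_alt str pos
instance (str : String) (pos : Int) (out : Int) : Decidable (Spec_BracketsPairing str pos out) := by unfold Spec_BracketsPairing; infer_instance

-- ===== CLAIM (what is proved, stated in full; the proofs are below) =====
def Claim_equal_BracketsPairing : Prop := ∀ (str : String) (pos : Int), Dom_BracketsPairing str pos → Pre_BracketsPairing str pos → Spec_BracketsPairing str pos (BracketsPairing str pos)

-- ===== LEMMAS AND PROOFS =====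

-- reference scan for A: index (within the stream) where the counter first returns to 0
def pvRefA : List Char → Int → Option Nat
  | [], _ => none
  | c :: l, pair =>
    let p := if c = '(' then pair + 1 else if c = ')' then pair - 1 else pair
    if p = 0 then some 0
    else match pvRefA l p with
      | none => none
      | some j => some (j + 1)

-- reference scan for B: index of the close of the current level, recursing on inner pairs
def pvRefB : List Char → Option Nat
  | [] => none
  | c :: l =>
    if c = ')' then some 0
    else if c = '(' then
      match pvRefB l with
      | none => none
      | some j =>
        match pvRefB (l.drop (j + 1)) with
        | none => none
        | some m => some (j + 2 + m)
    else
      match pvRefB l with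
      | none => none
      | some j => some (j + 1)
termination_by l => l.length
decreasing_by all_goals (simp; try omega)

-- k-fold iteration of pvRefB (closing k+1 levels), bridge between the two references
def pvNestB : List Char → Nat → Option Nat
  | l, 0 => pvRefB l
  | l, k + 1 =>
    match pvRefB l with
    | none => none
    | some j =>
      match pvNestB (l.drop (j + 1)) k with
      | none => none
      | some m => some (j + 1 + m)

-- ---- unfolding shapes of the reference scans ----

lemma refA_cons_open (l : List Char) (pair : Int) (h : pair + 1 ≠ 0) :
    pvRefA ('(' :: l) pair = (pvRefA l (pair + 1)).map (· + 1) := by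
  show (if pair + 1 = 0 then some 0 else
      match pvRefA l (pair + 1) with | none => none | some j => some (j + 1)) =
    (pvRefA l (pair + 1)).map (· + 1)
  rw [if_neg h]
  cases pvRefA l (pair + 1) <;> simp

lemma refA_cons_close_one (l : List Char) : pvRefA (')' :: l) 1 = some 0 := by
  show (if (1 : Int) - 1 = 0 then some 0 else
      match pvRefA l ((1 : Int) - 1) with | none => none | some j => some (j + 1)) = some 0
  norm_num

lemma refA_cons_close (l : List Char) (pair : Int) (h : pair - 1 ≠ 0) :
    pvRefA (')' :: l) pair = (pvRefA l (pair - 1)).map (· + 1) := by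
  show (if pair - 1 = 0 then some 0 else
      match pvRefA l (pair - 1) with | none => none | some j => some (j + 1)) =
    (pvRefA l (pair - 1)).map (· + 1)
  rw [if_neg h]
  cases pvRefA l (pair - 1) <;> simp

lemma refA_cons_other (c : Char) (l : List Char) (pair : Int) (hc1 : ¬ c = '(') (hc2 : ¬ c = ')')
    (h : pair ≠ 0) :
    pvRefA (c :: l) pair = (pvRefA l pair).map (· + 1) := by
  simp only [pvRefA]
  rw [if_neg hc1, if_neg hc2, if_neg h]
  cases pvRefA l pair <;> simp

lemma refB_cons_close (l : List Char) : pvRefB (')' :: l) = some 0 := by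
  simp [pvRefB]

lemma refB_cons_open (l : List Char) :
    pvRefB ('(' :: l) = (pvRefB l).bind (fun j => (pvRefB (l.drop (j + 1))).map (j + 2 + ·)) := by
  simp only [pvRefB]
  norm_num
  cases hb : pvRefB l with
  | none => simp
  | some j =>
    simp only [Option.bind_some]
    cases pvRefB (l.drop (j + 1)) <;> simp

lemma refB_cons_other (c : Char) (l : List Char) (hc1 : ¬ c = '(') (hc2 : ¬ c = ')') :
    pvRefB (c :: l) = (pvRefB l).map (· + 1) := by
  simp only [pvRefB]
  rw [if_neg hc2, if_neg hc1]
  cases pvRefB l <;> simp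

lemma nestB_zero (l : List Char) : pvNestB l 0 = pvRefB l := rfl

lemma nestB_succ (l : List Char) (k : Nat) :
    pvNestB l (k + 1) = (pvRefB l).bind (fun j => (pvNestB (l.drop (j + 1)) k).map (j + 1 + ·)) := by
  simp only [pvNestB]
  cases hb : pvRefB l with
  | none => simp
  | some j =>
    simp only [Option.bind_some]
    cases pvNestB (l.drop (j + 1)) k <;> simp

lemma nestB_none (l : List Char) (k : Nat) (h : pvRefB l = none) : pvNestB l k = none := by
  cases k <;> simp [nestB_zero, nestB_succ, h]

-- ---- facts about pvRefA ----

lemma pvRefA_lt_length : ∀ (l : List Char) (pair : Int) (J : Nat), pvRefA l pair = some J → J < l.length := by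
  intro l
  induction l with
  | nil => intro pair J h; simp [pvRefA] at h
  | cons c l ih =>
    intro pair J h
    simp only [pvRefA] at h
    by_cases hp : (if c = '(' then pair + 1 else if c = ')' then pair - 1 else pair) = 0
    · simp only [hp, if_pos] at h
      simp at h
      simp [← h]
    · simp only [if_neg hp] at h
      cases hr : pvRefA l (if c = '(' then pair + 1 else if c = ')' then pair - 1 else pair) with
      | none => rw [hr] at h; simp at h
      | some j =>
        rw [hr] at h; simp at h
        have := ih _ _ hr
        simp; omega

lemma pvRefA_isSome_of_counts : ∀ (l : List Char) (pair : Int), 1 ≤ pair →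
    (∃ j < l.length, ((l.take (j + 1)).count ')' : Int) = ((l.take (j + 1)).count '(' : Int) + pair) →
    (pvRefA l pair).isSome := by
  intro l
  induction l with
  | nil => rintro pair _ ⟨j, hj, _⟩; simp at hj
  | cons c l ih =>
    rintro pair hpair ⟨j, hj, hcnt⟩
    simp only [List.length_cons] at hj
    simp only [List.take_succ_cons, List.count_cons] at hcnt
    by_cases hc1 : c = '('
    · subst hc1
      simp at hcnt
      have hj1 : j ≠ 0 := by
        rintro rfl
        simp at hcnt
        omega
      have hrec := ih (pair + 1) (by omega) ⟨j - 1, by omega, by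
        rw [show j - 1 + 1 = j by omega]
        omega⟩
      obtain ⟨J, hJ⟩ := Option.isSome_iff_exists.mp hrec
      rw [refA_cons_open l pair (by omega), hJ]
      simp
    · by_cases hc2 : c = ')'
      · subst hc2
        by_cases hp1 : pair = 1
        · subst hp1
          rw [refA_cons_close_one]
          simp
        · simp at hcnt
          have hj1 : j ≠ 0 := by
            rintro rfl
            simp at hcnt
            omega
          have hrec := ih (pair - 1) (by omega) ⟨j - 1, by omega, by
            rw [show j - 1 + 1 = j by omega]
            omega⟩
          obtain ⟨J, hJ⟩ := Option.isSome_iff_exists.mp hrec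
          rw [refA_cons_close l pair (by omega), hJ]
          simp
      · simp [hc1, hc2] at hcnt
        have hj1 : j ≠ 0 := by
          rintro rfl
          simp at hcnt
          omega
        have hrec := ih pair hpair ⟨j - 1, by omega, by
          rw [show j - 1 + 1 = j by omega]
          omega⟩
        obtain ⟨J, hJ⟩ := Option.isSome_iff_exists.mp hrec
        rw [refA_cons_other c l pair hc1 hc2 (by omega), hJ]
        simp

-- ---- the bridge: A's counter scan equals B's recursive scan ----

lemma pvRefA_eq_nestB : ∀ (l : List Char) (k : Nat), pvRefA l ((k : Int) + 1) = pvNestB l k := by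
  intro l
  induction l with
  | nil =>
    intro k
    cases k <;> simp [pvRefA, pvRefB, pvNestB]
  | cons c l ih =>
    intro k
    by_cases hc1 : c = '('
    · subst hc1
      rw [refA_cons_open l ((k : Int) + 1) (by omega)]
      rw [show (k : Int) + 1 + 1 = ((k + 1 : Nat) : Int) + 1 by push_cast; ring]
      rw [ih (k + 1)]
      cases hb : pvRefB l with
      | none =>
        have hBnone : pvRefB ('(' :: l) = none := by
          rw [refB_cons_open, hb]
          rfl
        rw [nestB_none l (k + 1) hb, nestB_none _ k hBnone]
        rfl
      | some j =>
        cases he : pvRefB (l.drop (j + 1)) with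
        | none =>
          have hBnone : pvRefB ('(' :: l) = none := by
            rw [refB_cons_open, hb]
            simp [he]
          rw [nestB_succ l k, hb]
          simp only [Option.bind_some]
          rw [nestB_none _ k he, nestB_none _ k hBnone]
          rfl
        | some m =>
          have hBsome : pvRefB ('(' :: l) = some (j + 2 + m) := by
            rw [refB_cons_open, hb]
            simp only [Option.bind_some, he, Option.map_some]
          cases k with
          | zero =>
            rw [nestB_succ l 0, hb]
            simp only [Option.bind_some]
            rw [nestB_zero, he, nestB_zero, hBsome]
            simp only [Option.map_some, Option.some.injEq]
            omega
          | succ k' =>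
            have hdd : (l.drop (j + 1)).drop (m + 1) = l.drop (j + 1 + (m + 1)) := by
              rw [List.drop_drop]
            have hds : ('(' :: l).drop (j + 2 + m + 1) = l.drop (j + 1 + (m + 1)) := by
              rw [show j + 2 + m + 1 = (j + 1 + (m + 1)) + 1 by omega, List.drop_succ_cons]
            rw [nestB_succ l (k' + 1), hb]
            simp only [Option.bind_some]
            rw [nestB_succ (l.drop (j + 1)) k', he]
            simp only [Option.bind_some]
            rw [hdd]
            rw [nestB_succ _ k', hBsome]
            simp only [Option.bind_some]
            rw [hds]
            cases pvNestB (l.drop (j + 1 + (m + 1))) k' with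
            | none => simp
            | some q => simp; omega
    · by_cases hc2 : c = ')'
      · subst hc2
        cases k with
        | zero =>
          simp only [Nat.cast_zero, zero_add]
          rw [refA_cons_close_one, nestB_zero, refB_cons_close]
        | succ k' =>
          rw [refA_cons_close l _ (by push_cast; omega)]
          rw [show ((k' + 1 : Nat) : Int) + 1 - 1 = ((k' : Nat) : Int) + 1 by push_cast; ring]
          rw [ih k', nestB_succ, refB_cons_close]
          simp only [Option.bind_some, List.drop_succ_cons, List.drop_zero]
          cases pvNestB l k' with
          | none => simp
          | some q => simp; omega
      · rw [refA_cons_other c l _ hc1 hc2 (by omega)]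
        rw [ih k]
        cases k with
        | zero =>
          rw [nestB_zero, nestB_zero, refB_cons_other c l hc1 hc2]
        | succ k' =>
          rw [nestB_succ, nestB_succ, refB_cons_other c l hc1 hc2]
          cases hb : pvRefB l with
          | none => simp
          | some j =>
            simp only [Option.map_some, Option.bind_some]
            rw [List.drop_succ_cons]
            cases pvNestB (l.drop (j + 1)) k' with
            | none => simp
            | some q => simp; omega

lemma pvRefB_eq_refA (l : List Char) : pvRefB l = pvRefA l 1 := by
  have h := pvRefA_eq_nestB l 0
  rw [nestB_zero] at h
  rw [← h]
  norm_num

-- ---- the visited-character stream ----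

lemma pvStream_head (str : String) (s : Int) (h : -(str.toList.length : Int) ≤ s) :
    PySem.Str.pyGet? str s = (pvStream str s).head? := by
  have hw : PySem.Str.pyGet? str s = PySem.List.pyGet? str.toList s := by simp [PySem.Str.pyGet?]
  unfold pvStream
  by_cases hneg : s < 0
  · rw [if_pos hneg]
    have hks : ((-s).toNat : Int) = -s := Int.toNat_of_nonneg (by omega)
    have hk1 : 0 < (-s).toNat := by omega
    have hk2 : (-s).toNat ≤ str.toList.length := by omega
    have hget := PySem.List.pyGet?_neg_natCast str.toList (-s).toNat hk1 hk2
    rw [show (-(((-s).toNat : Nat) : Int)) = s by omega] at hget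
    have hne : str.toList.drop (str.toList.length - (-s).toNat) ≠ [] := by
      rw [Ne, List.drop_eq_nil_iff]
      omega
    rw [hw, hget, List.head?_append_of_ne_nil _ hne, List.head?_drop]
  · rw [if_neg hneg, hw, PySem.List.pyGet?_of_nonneg str.toList (by omega), List.head?_drop]

lemma pvStream_tail (str : String) (s : Int) (h : -(str.toList.length : Int) ≤ s) :
    pvStream str (s + 1) = (pvStream str s).tail := by
  unfold pvStream
  by_cases h1 : s + 1 < 0
  · rw [if_pos h1, if_pos (by omega : s < 0)]
    have hks : ((-s).toNat : Int) = -s := Int.toNat_of_nonneg (by omega)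
    have hks1 : ((-(s + 1)).toNat : Int) = -(s + 1) := Int.toNat_of_nonneg (by omega)
    have hne : str.toList.drop (str.toList.length - (-s).toNat) ≠ [] := by
      rw [Ne, List.drop_eq_nil_iff]
      omega
    rw [List.tail_append_of_ne_nil hne, List.tail_drop]
    rw [show str.toList.length - (-(s + 1)).toNat = str.toList.length - (-s).toNat + 1 by omega]
  · by_cases h2 : s < 0
    · rw [if_neg h1, if_pos h2]
      have hks : ((-s).toNat : Int) = -s := Int.toNat_of_nonneg (by omega)
      have hs1 : ((s + 1).toNat : Int) = s + 1 := Int.toNat_of_nonneg (by omega)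
      have hne : str.toList.drop (str.toList.length - (-s).toNat) ≠ [] := by
        rw [Ne, List.drop_eq_nil_iff]
        omega
      rw [List.tail_append_of_ne_nil hne, List.tail_drop]
      rw [show str.toList.length - (-s).toNat + 1 = str.toList.length by omega]
      rw [show (s + 1).toNat = 0 by omega]
      simp
    · have hs0 : (s.toNat : Int) = s := Int.toNat_of_nonneg (by omega)
      have hs1 : ((s + 1).toNat : Int) = s + 1 := Int.toNat_of_nonneg (by omega)
      rw [if_neg h1, if_neg (by omega : ¬ s < 0), List.tail_drop]
      rw [show (s + 1).toNat = s.toNat + 1 by omega]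

lemma pvStream_add (str : String) (s : Int) (h : -(str.toList.length : Int) ≤ s) :
    ∀ (m : Nat), pvStream str (s + m) = (pvStream str s).drop m := by
  intro m
  induction m with
  | zero => simp
  | succ m ih =>
    rw [show s + ((m + 1 : Nat) : Int) = (s + m) + 1 by push_cast; ring]
    rw [pvStream_tail str (s + m) (by omega), ih, List.tail_drop]

lemma pvStream_len (str : String) (s : Int) : (pvStream str s).length ≤ 2 * str.toList.length := by
  unfold pvStream
  split <;> simp <;> omega

-- ---- the ports compute the reference scans ----

lemma pvLoopA_pair_zero (str : String) (f : Nat) (q : Int) : pvLoopA str f q 0 = q := by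
  cases f <;> simp [pvLoopA]

lemma pvLoopA_eq : ∀ (str : String) (fuel : Nat) (pos pair : Int) (J : Nat), pair ≠ 0 →
    -(str.toList.length : Int) ≤ pos + 1 → pvRefA (pvStream str (pos + 1)) pair = some J →
    J < fuel → pvLoopA str fuel pos pair = pos + 1 + J := by
  intro str fuel
  induction fuel with
  | zero => intro pos pair J _ _ _ h; omega
  | succ f ih =>
    intro pos pair J hpair h href hJ
    cases hl : pvStream str (pos + 1) with
    | nil => rw [hl] at href; simp [pvRefA] at href
    | cons c t =>
      rw [hl] at href
      have hhead := pvStream_head str (pos + 1) h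
      rw [hl] at hhead
      simp only [List.head?_cons] at hhead
      simp only [pvLoopA, if_neg hpair, hhead]
      simp only [pvRefA] at href
      by_cases hp : (if c = '(' then pair + 1 else if c = ')' then pair - 1 else pair) = 0
      · simp only [hp, if_pos] at href
        simp at href
        rw [hp, pvLoopA_pair_zero]
        omega
      · simp only [if_neg hp] at href
        cases hr : pvRefA t (if c = '(' then pair + 1 else if c = ')' then pair - 1 else pair) with
        | none => rw [hr] at href; simp at href
        | some J' =>
          rw [hr] at href
          simp at href
          have ht : pvStream str (pos + 1 + 1) = t := by
            rw [pvStream_tail str (pos + 1) h, hl]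
            rfl
          have hrec := ih (pos + 1) _ J' hp (by omega) (by rw [ht]; exact hr) (by omega)
          rw [hrec]
          omega

lemma pvFindB_eq : ∀ (str : String) (fuel : Nat) (s : Int) (J : Nat),
    -(str.toList.length : Int) ≤ s → pvRefB (pvStream str s) = some J →
    J < fuel → pvFindB str fuel s = s + J := by
  intro str fuel
  induction fuel with
  | zero => intro s J _ _ h; omega
  | succ f ih =>
    intro s J h href hJ
    cases hl : pvStream str s with
    | nil => rw [hl] at href; simp [pvRefB] at href
    | cons c t =>
      rw [hl] at href
      have hhead := pvStream_head str s h
      rw [hl] at hhead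
      simp only [List.head?_cons] at hhead
      simp only [pvFindB, hhead]
      have ht : pvStream str (s + 1) = t := by
        rw [pvStream_tail str s h, hl]
        rfl
      by_cases hc1 : c = ')'
      · subst hc1
        rw [refB_cons_close] at href
        simp at href
        rw [if_pos rfl]
        omega
      · by_cases hc2 : c = '('
        · subst hc2
          rw [if_neg (by decide), if_pos rfl]
          rw [refB_cons_open] at href
          cases hb : pvRefB t with
          | none => rw [hb] at href; simp at href
          | some j =>
            rw [hb] at href
            simp only [Option.bind_some] at href
            cases he : pvRefB (t.drop (j + 1)) with
            | none => rw [he] at href; simp at href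
            | some m =>
              rw [he] at href
              simp at href
              have h1 : pvFindB str f (s + 1) = (s + 1) + j :=
                ih (s + 1) j (by omega) (by rw [ht]; exact hb) (by omega)
              rw [h1]
              have hd : pvStream str (s + 1 + j + 1) = t.drop (j + 1) := by
                rw [show s + 1 + (j : Int) + 1 = s + ((j + 2 : Nat) : Int) by push_cast; ring]
                rw [pvStream_add str s h (j + 2), hl]
                rw [show j + 2 = (j + 1) + 1 by omega, List.drop_succ_cons]
              have h2 : pvFindB str f (s + 1 + j + 1) = (s + 1 + j + 1) + m :=
                ih (s + 1 + j + 1) m (by omega) (by rw [hd]; exact he) (by omega)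
              rw [h2]
              omega
        · rw [if_neg hc1, if_neg hc2]
          rw [refB_cons_other c t hc2 hc1] at href
          cases hb : pvRefB t with
          | none => rw [hb] at href; simp at href
          | some J' =>
            rw [hb] at href
            simp at href
            have h1 : pvFindB str f (s + 1) = (s + 1) + J' :=
              ih (s + 1) J' (by omega) (by rw [ht]; exact hb) (by omega)
            rw [h1]
            omega

-- ===== VERDICT (by name: the statement is the Claim_ definition above) =====
theorem BracketsPairing_spec : Claim_equal_BracketsPairing := by
  intro str pos _ hPre
  obtain ⟨hs, hex⟩ := hPre
  unfold Spec_BracketsPairing BracketsPairing BracketsPairing_alt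
  have hsome := pvRefA_isSome_of_counts (pvStream str (pos + 1)) 1 le_rfl hex
  obtain ⟨J, hJ⟩ := Option.isSome_iff_exists.mp hsome
  have hlt : J < pvFuel str := by
    have h1 := pvRefA_lt_length _ _ _ hJ
    have h2 := pvStream_len str (pos + 1)
    unfold pvFuel
    omega
  have hA := pvLoopA_eq str (pvFuel str) pos 1 J one_ne_zero hs hJ hlt
  have hB := pvFindB_eq str (pvFuel str) (pos + 1) J hs (by rw [pvRefB_eq_refA]; exact hJ) hlt
  rw [hA, hB]
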